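-- pv_equiv track=rewrite | github.com/szuucsdora/Prog1 | 30.py | ujlista
-- ===== SOURCE A (Python) =====
-- def kisbetu(a):
--     for str in a:
--         if 'a' <= str <= 'z':
--             return True
--         else:
--             return False
--
-- def nagybetu(a):
--     for str in a:
--         if 'A' <= str <= 'Z':
--             return True
--         else:
--             return False
--
-- def szamok(a):
--
--     for str in a:
--
--         if '1' <= str <= '9':
--
--             return True
--         else:
--             return False
--
-- def paratlanszamok(a):
--     if szamok(a)==True:
--         for i in a:
--             i=int(i)
--             if i%2 != 0:
--
--                 return True
--             else:
--                 return False
--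
-- def parosszamok(a):
--     if szamok(a)==True:
--         for i in a:
--             i=int(i)
--             if i%2 == 0:
--
--                 return True
--             else:
--                 return False
--
-- def csaknulla(a):
--     for str in a:
--         if '0' == str :
--             return True
--         else:
--             return False
--
-- def ujlista(a):
--     ls=[]
--     ls1=[]
--     ls2=[]
--     ls3=[]
--     ls4=[]
--     ls5=[]
--     for i in a:
--         if kisbetu(i) == True:
--             ls.append(i)
--             ls=sorted(ls)
--     for i in a:
--         if nagybetu(i)==True:
--             ls1.append(i)
--             ls1=sorted(ls1)
--     for i in a:
--         if parosszamok(i) == True: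
--             ls2.append(i)
--             ls2=sorted(ls2)
--     for i in a:
--         if paratlanszamok(i) == True:
--             ls3.append(i)
--             ls3=sorted(ls3)
--     for i in a:
--         if csaknulla(i) == True:
--             ls4.append(i)
--             ls4=sorted(ls4)
--     ls5=ls+ls1+ls2+ls3+ls4
--     return ls5
-- ===== SOURCE B (Python) =====
-- def ujlista(a):
--     low, up, even, odd, zero = [], [], [], [], []
--     for s in a:
--         if not s:
--             continue
--         c = s[0]
--         if 'a' <= c <= 'z':
--             low.append(s)
--         elif 'A' <= c <= 'Z':
--             up.append(s)
--         elif c in '2468':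
--             even.append(s)
--         elif c in '13579':
--             odd.append(s)
--         elif c == '0':
--             zero.append(s)
--     return sorted(low) + sorted(up) + sorted(even) + sorted(odd) + sorted(zero)
-- ===== Notes on version B (the rewrite author's own statement) =====
-- stated objective: faster
-- what changed: Replaces A's five full scans that re-sort the growing bucket after every append (repeated insertion-sorting) with one classification pass over the input into five buckets via the first character, each bucket sorted once at the end.
import Mathlib
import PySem

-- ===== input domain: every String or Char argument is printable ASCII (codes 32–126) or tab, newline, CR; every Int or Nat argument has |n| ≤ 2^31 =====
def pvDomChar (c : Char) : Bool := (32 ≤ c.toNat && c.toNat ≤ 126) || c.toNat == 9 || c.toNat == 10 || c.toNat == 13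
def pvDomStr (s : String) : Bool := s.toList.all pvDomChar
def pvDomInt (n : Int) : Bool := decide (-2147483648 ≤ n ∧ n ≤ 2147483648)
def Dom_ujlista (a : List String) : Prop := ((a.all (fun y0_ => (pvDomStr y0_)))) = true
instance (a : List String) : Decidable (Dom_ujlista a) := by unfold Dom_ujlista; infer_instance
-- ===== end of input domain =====

-- B replaces A's five scans (each re-sorting its growing bucket after every append) by one
-- classification pass into five buckets and a single sort of each bucket at the end (objective: faster).

-- ===== PORT A =====
-- Each helper's 'for str in a: return …' decides on the FIRST character only; on the empty
-- string the loop body never runs and Python returns None (falsy), ported as false.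
def kisbetu (a : String) : Bool :=
  match a.toList with
  | [] => false
  | c :: _ => decide ('a' ≤ c) && decide (c ≤ 'z')

def nagybetu (a : String) : Bool :=
  match a.toList with
  | [] => false
  | c :: _ => decide ('A' ≤ c) && decide (c ≤ 'Z')

def szamok (a : String) : Bool :=
  match a.toList with
  | [] => false
  | c :: _ => decide ('1' ≤ c) && decide (c ≤ '9')

-- int(i) on the first character; exact here since szamok guarantees a digit '1'..'9',
-- where Python's int(c) is c.toNat - 48.
def paratlanszamok (a : String) : Bool :=
  if szamok a = true then
    match a.toList with
    | [] => false
    | c :: _ => decide ((c.toNat - 48) % 2 ≠ 0)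
  else false

def parosszamok (a : String) : Bool :=
  if szamok a = true then
    match a.toList with
    | [] => false
    | c :: _ => decide ((c.toNat - 48) % 2 = 0)
  else false

def csaknulla (a : String) : Bool :=
  match a.toList with
  | [] => false
  | c :: _ => decide (c = '0')

def ujlista (a : List String) : List String :=
  let ls := a.foldl (fun l i => if kisbetu i = true then PySem.List.sorted (l ++ [i]) (fun x => x) false else l) []
  let ls1 := a.foldl (fun l i => if nagybetu i = true then PySem.List.sorted (l ++ [i]) (fun x => x) false else l) []
  let ls2 := a.foldl (fun l i => if parosszamok i = true then PySem.List.sorted (l ++ [i]) (fun x => x) false else l) []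
  let ls3 := a.foldl (fun l i => if paratlanszamok i = true then PySem.List.sorted (l ++ [i]) (fun x => x) false else l) []
  let ls4 := a.foldl (fun l i => if csaknulla i = true then PySem.List.sorted (l ++ [i]) (fun x => x) false else l) []
  ls ++ ls1 ++ ls2 ++ ls3 ++ ls4

-- ===== PORT B =====
-- The loop body of Source B: route s by its first character into one of the five buckets
-- (low, up, even, odd, zero); 'c in "2468"' / 'c in "13579"' are the literal memberships.
def bstep (b : List String × List String × List String × List String × List String) (s : String) :
    List String × List String × List String × List String × List String :=
  match s.toList with
  | [] => b                                   -- 'if not s: continue'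
  | c :: _ =>
    if 'a' ≤ c ∧ c ≤ 'z' then (b.1 ++ [s], b.2.1, b.2.2.1, b.2.2.2.1, b.2.2.2.2)
    else if 'A' ≤ c ∧ c ≤ 'Z' then (b.1, b.2.1 ++ [s], b.2.2.1, b.2.2.2.1, b.2.2.2.2)
    else if c = '2' ∨ c = '4' ∨ c = '6' ∨ c = '8' then (b.1, b.2.1, b.2.2.1 ++ [s], b.2.2.2.1, b.2.2.2.2)
    else if c = '1' ∨ c = '3' ∨ c = '5' ∨ c = '7' ∨ c = '9' then (b.1, b.2.1, b.2.2.1, b.2.2.2.1 ++ [s], b.2.2.2.2)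
    else if c = '0' then (b.1, b.2.1, b.2.2.1, b.2.2.2.1, b.2.2.2.2 ++ [s])
    else b

def ujlista_alt (a : List String) : List String :=
  let b := a.foldl bstep ([], [], [], [], [])
  PySem.List.sorted b.1 (fun x => x) false ++ PySem.List.sorted b.2.1 (fun x => x) false ++
    PySem.List.sorted b.2.2.1 (fun x => x) false ++ PySem.List.sorted b.2.2.2.1 (fun x => x) false ++
    PySem.List.sorted b.2.2.2.2 (fun x => x) false

-- ===== PRECONDITION & SPEC =====
def Spec_ujlista (a : List String) (out : List String) : Prop := out = ujlista_alt a
instance (a : List String) (out : List String) : Decidable (Spec_ujlista a out) := by unfold Spec_ujlista; infer_instance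

-- ===== CLAIM (what is proved, stated in full; the proofs are below) =====
def Claim_equal_ujlista : Prop := ∀ (a : List String), Dom_ujlista a → Spec_ujlista a (ujlista a)

-- ===== LEMMAS AND PROOFS =====

-- A digit first character is exactly one of '1'..'9'.
theorem digit_cases (c : Char) (h1 : '1' ≤ c) (h2 : c ≤ '9') :
    c = '1' ∨ c = '2' ∨ c = '3' ∨ c = '4' ∨ c = '5' ∨ c = '6' ∨ c = '7' ∨ c = '8' ∨ c = '9' := by
  simp only [Char.le_def, UInt32.le_iff_toNat_le] at h1 h2
  have hc : ∀ d : Char, c.val.toNat = d.val.toNat → c = d := fun d h => Char.ext (UInt32.toNat_inj.mp h)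
  have hd : c.val.toNat = 49 ∨ c.val.toNat = 50 ∨ c.val.toNat = 51 ∨ c.val.toNat = 52 ∨
      c.val.toNat = 53 ∨ c.val.toNat = 54 ∨ c.val.toNat = 55 ∨ c.val.toNat = 56 ∨ c.val.toNat = 57 := by
    have e1 : ('1':Char).val.toNat = 49 := rfl
    have e9 : ('9':Char).val.toNat = 57 := rfl
    rw [e1] at h1; rw [e9] at h2; omega
  rcases hd with h|h|h|h|h|h|h|h|h <;> [exact .inl (hc _ h); exact .inr (.inl (hc _ h));
    exact .inr (.inr (.inl (hc _ h))); exact .inr (.inr (.inr (.inl (hc _ h))));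
    exact .inr (.inr (.inr (.inr (.inl (hc _ h))))); exact .inr (.inr (.inr (.inr (.inr (.inl (hc _ h))))));
    exact .inr (.inr (.inr (.inr (.inr (.inr (.inl (hc _ h)))))));
    exact .inr (.inr (.inr (.inr (.inr (.inr (.inr (.inl (hc _ h))))))));
    exact .inr (.inr (.inr (.inr (.inr (.inr (.inr (.inr (hc _ h))))))))]

theorem even_digit (c : Char) (h1 : '1' ≤ c) (h2 : c ≤ '9') (hp : (c.toNat - 48) % 2 = 0) :
    c = '2' ∨ c = '4' ∨ c = '6' ∨ c = '8' := by
  rcases digit_cases c h1 h2 with h|h|h|h|h|h|h|h|h <;> subst h <;> revert hp <;> decide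

theorem odd_digit (c : Char) (h1 : '1' ≤ c) (h2 : c ≤ '9') (hp : (c.toNat - 48) % 2 ≠ 0) :
    c = '1' ∨ c = '3' ∨ c = '5' ∨ c = '7' ∨ c = '9' := by
  rcases digit_cases c h1 h2 with h|h|h|h|h|h|h|h|h <;> subst h <;> revert hp <;> decide

-- B's step written with A's five classifiers.
theorem bstep_eq (b : List String × List String × List String × List String × List String) (s : String) :
    bstep b s = ((if kisbetu s then b.1 ++ [s] else b.1),
                 (if nagybetu s then b.2.1 ++ [s] else b.2.1),
                 (if parosszamok s then b.2.2.1 ++ [s] else b.2.2.1),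
                 (if paratlanszamok s then b.2.2.2.1 ++ [s] else b.2.2.2.1),
                 (if csaknulla s then b.2.2.2.2 ++ [s] else b.2.2.2.2)) := by
  cases hs : s.toList with
  | nil => simp [bstep, kisbetu, nagybetu, parosszamok, paratlanszamok, csaknulla, szamok, hs]
  | cons c t =>
    by_cases h0 : 'a' ≤ c ∧ c ≤ 'z'
    · obtain ⟨h0a, h0b⟩ := h0
      have hnu : ¬ (c ≤ 'Z') := fun h => absurd (lt_of_lt_of_le (by decide : ('Z':Char) < 'a') h0a) (not_lt.mpr h)
      have hnd : ¬ (c ≤ '9') := fun h => absurd (lt_of_lt_of_le (by decide : ('9':Char) < 'a') h0a) (not_lt.mpr h)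
      have hn0 : ¬ (c = '0') := fun h => absurd h0a (by subst h; decide)
      simp [bstep, kisbetu, nagybetu, parosszamok, paratlanszamok, csaknulla, szamok, hs,
        h0a, h0b, hnu, hnd, hn0]
    · by_cases h1 : 'A' ≤ c ∧ c ≤ 'Z'
      · obtain ⟨h1a, h1b⟩ := h1
        have hnl : ¬ ('a' ≤ c) := fun h => absurd (lt_of_le_of_lt h1b (by decide : ('Z':Char) < 'a')) (not_lt.mpr h)
        have hnd : ¬ (c ≤ '9') := fun h => absurd (lt_of_lt_of_le (by decide : ('9':Char) < 'A') h1a) (not_lt.mpr h)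
        have hn0 : ¬ (c = '0') := fun h => absurd h1a (by subst h; decide)
        simp [bstep, kisbetu, nagybetu, parosszamok, paratlanszamok, csaknulla, szamok, hs,
          h1a, h1b, hnl, hnd, hn0]
      · by_cases h2 : c = '2' ∨ c = '4' ∨ c = '6' ∨ c = '8'
        · rcases h2 with h|h|h|h <;> subst h <;>
            simp [bstep, kisbetu, nagybetu, parosszamok, paratlanszamok, csaknulla, szamok, hs]
        · by_cases h3 : c = '1' ∨ c = '3' ∨ c = '5' ∨ c = '7' ∨ c = '9'
          · rcases h3 with h|h|h|h|h <;> subst h <;>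
              simp [bstep, kisbetu, nagybetu, parosszamok, paratlanszamok, csaknulla, szamok, hs]
          · by_cases h4 : c = '0'
            · subst h4
              simp [bstep, kisbetu, nagybetu, parosszamok, paratlanszamok, csaknulla, szamok, hs]
            · have hsz : ¬ ('1' ≤ c ∧ c ≤ '9') := by
                rintro ⟨hd1, hd2⟩
                by_cases hp : (c.toNat - 48) % 2 = 0
                · exact h2 (even_digit c hd1 hd2 hp)
                · exact h3 (odd_digit c hd1 hd2 hp)
              simp [bstep, kisbetu, nagybetu, parosszamok, paratlanszamok, csaknulla, szamok, hs,
                h0, h1, h2, h3, h4, hsz]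

-- B's fold computes the five filtered buckets in input order.
theorem bfold (a : List String) :
    ∀ b : List String × List String × List String × List String × List String,
    a.foldl bstep b = (b.1 ++ a.filter kisbetu, b.2.1 ++ a.filter nagybetu,
      b.2.2.1 ++ a.filter parosszamok, b.2.2.2.1 ++ a.filter paratlanszamok,
      b.2.2.2.2 ++ a.filter csaknulla) := by
  induction a with
  | nil => intro b; simp
  | cons hd tl ih =>
    intro b
    rw [List.foldl_cons, bstep_eq, ih]
    cases hk : kisbetu hd <;> cases hn : nagybetu hd <;> cases hp : parosszamok hd <;>
      cases hq : paratlanszamok hd <;> cases hz : csaknulla hd <;>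
      simp [hk, hn, hp, hq, hz]

-- A's repeated re-sorting loop is sorting the filtered list.
theorem afold (p : String → Bool) (a : List String) :
    ∀ s : List String,
      a.foldl (fun l i => if p i = true then PySem.List.sorted (l ++ [i]) (fun x => x) false else l)
        (PySem.List.sorted s (fun x => x) false)
      = PySem.List.sorted (s ++ a.filter p) (fun x => x) false := by
  induction a with
  | nil => intro s; simp
  | cons hd tl ih =>
    intro s
    rw [List.foldl_cons]
    by_cases h : p hd = true
    · have hsort : PySem.List.sorted (PySem.List.sorted s (fun x => x) false ++ [hd]) (fun x => x) false
          = PySem.List.sorted (s ++ [hd]) (fun x => x) false :=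
        PySem.List.sorted_eq_sorted_of_perm _ _ _ (fun a b h => h)
          ((PySem.List.sorted_perm s (fun x => x) false).append_right _)
      rw [if_pos h, hsort, ih (s ++ [hd])]
      simp [h]
    · rw [if_neg h, ih s]
      simp [h]

theorem afold_nil (p : String → Bool) (a : List String) :
    a.foldl (fun l i => if p i = true then PySem.List.sorted (l ++ [i]) (fun x => x) false else l) []
      = PySem.List.sorted (a.filter p) (fun x => x) false := by
  have h := afold p a []
  rw [show PySem.List.sorted ([] : List String) (fun x => x) false = [] from rfl] at h
  simpa using h

-- ===== VERDICT (by name: the statement is the Claim_ definition above) =====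
theorem ujlista_spec : Claim_equal_ujlista := by
  intro a _
  show ujlista a = ujlista_alt a
  unfold ujlista ujlista_alt
  rw [bfold a ([], [], [], [], []),
    afold_nil kisbetu a, afold_nil nagybetu a, afold_nil parosszamok a,
    afold_nil paratlanszamok a, afold_nil csaknulla a]
  simp [List.append_assoc]
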